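-- pv_equiv track=rewrite | github.com/SNaganoAomori/GNSS_App | apps/mapper.py | size_list
-- ===== SOURCE A (Python) =====
-- from typing import List
--
-- def size_list(values: List[int], normal_size=6) -> List[int]:
--     '''最初の測点と5点ごとにサイズを大きく設定する'''
--     size_lst = []
--     for i, _ in enumerate(values):
--         i += 1
--         if i == 1:
--             size_lst.append(int(normal_size * 2.2))
--         elif i % 5 == 0:
--             size_lst.append(int(normal_size * 1.8))
--         else:
--             size_lst.append(normal_size)
--     return size_lst
-- ===== SOURCE B (Python) =====
-- from typing import List
--
-- def size_list(values: List[int], normal_size=6) -> List[int]: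
--     '''最初の測点と5点ごとにサイズを大きく設定する'''
--     n = len(values)
--     size_lst = [normal_size] * n
--     big = int(normal_size * 1.8)
--     for i in range(4, n, 5):
--         size_lst[i] = big
--     if size_lst:
--         size_lst[0] = int(normal_size * 2.2)
--     return size_lst
-- ===== Notes on version B (the rewrite author's own statement) =====
-- stated objective: simpler
-- what changed: Replaces the per-element three-way branch inside the enumerate loop by bulk initialisation ([normal_size]*n) followed by targeted overwrites: a strided range(4, n, 5) loop writes the 1.8x value at the i%5==4 positions and a single assignment writes the 2.2x value at index 0 when non-empty.
import Mathlib
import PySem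

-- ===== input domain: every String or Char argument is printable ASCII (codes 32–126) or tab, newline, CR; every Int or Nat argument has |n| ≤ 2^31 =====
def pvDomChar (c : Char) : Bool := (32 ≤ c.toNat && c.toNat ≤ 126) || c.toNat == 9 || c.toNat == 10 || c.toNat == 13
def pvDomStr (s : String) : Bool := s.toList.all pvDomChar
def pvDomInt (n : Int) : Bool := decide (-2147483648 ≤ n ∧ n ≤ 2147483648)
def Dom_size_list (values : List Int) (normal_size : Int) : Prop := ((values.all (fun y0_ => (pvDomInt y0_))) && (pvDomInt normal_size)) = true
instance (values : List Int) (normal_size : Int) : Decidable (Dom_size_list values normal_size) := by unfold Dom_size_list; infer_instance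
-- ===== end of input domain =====

-- B replaces A's per-element three-way branch by bulk initialisation plus targeted
-- overwrites (a strided range(4,n,5) loop and one write at index 0): simpler decomposition.


-- ===== PORT A =====
-- Exact integer model of Python's `int(n * c)` where c is the IEEE-754 double with value
-- cNum * 2^(-cExp) (n exactly representable, |n| ≤ 2^31 < 2^53): the product n*cNum*2^(-cExp)
-- is rounded to 53 significant bits, round-half-to-even, then truncated toward zero.
-- Used by both ports, since both Pythons compute int(normal_size*1.8) / int(normal_size*2.2).
def truncMulFloat (n cNum : Int) (cExp : Nat) : Int :=
  let m := n * cNum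
  if m = 0 then 0
  else
    let k := (m.natAbs).log2 + 1          -- bit length of |m|
    if k ≤ 53 then m.tdiv (2 ^ cExp)      -- exact product, truncate toward zero
    else
      let s := k - 53
      let q := m.fdiv (2 ^ s)
      let rem := m.emod (2 ^ s)
      let half := (2 : Int) ^ (s - 1)
      let q' := if rem > half ∨ (rem = half ∧ q.emod 2 = 1) then q + 1 else q
      (q' * 2 ^ s).tdiv (2 ^ cExp)

-- 1.8 = 8106479329266893 * 2^-52,  2.2 = 4953959590107546 * 2^-51 (exact double constants)
-- A's loop: for i, _ in enumerate(values): i += 1; three-way branch; append.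
def sizeListGo (normal_size : Int) : List Int → Nat → List Int → List Int
  | [], _, acc => acc
  | _ :: rest, i, acc =>
    let i1 := i + 1
    if i1 = 1 then
      sizeListGo normal_size rest (i + 1) (acc ++ [truncMulFloat normal_size 4953959590107546 51])
    else if i1 % 5 = 0 then
      sizeListGo normal_size rest (i + 1) (acc ++ [truncMulFloat normal_size 8106479329266893 52])
    else
      sizeListGo normal_size rest (i + 1) (acc ++ [normal_size])

def size_list (values : List Int) (normal_size : Int) : List Int :=
  sizeListGo normal_size values 0 []

-- ===== PORT B =====
def size_list_alt (values : List Int) (normal_size : Int) : List Int :=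
  let n := values.length
  let size_lst := List.replicate n normal_size
  let big := truncMulFloat normal_size 8106479329266893 52
  let size_lst := (PySem.List.pyRange 4 (n : Int) 5).foldl (fun l i => l.set i.toNat big) size_lst
  if size_lst.isEmpty then size_lst
  else size_lst.set 0 (truncMulFloat normal_size 4953959590107546 51)

-- ===== PRECONDITION & SPEC =====
def Spec_size_list (values : List Int) (normal_size : Int) (out : List Int) : Prop := out = size_list_alt values normal_size
instance (values : List Int) (normal_size : Int) (out : List Int) : Decidable (Spec_size_list values normal_size out) := by unfold Spec_size_list; infer_instance

-- ===== CLAIM (what is proved, stated in full; the proofs are below) =====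
def Claim_equal_size_list : Prop := ∀ (values : List Int) (normal_size : Int), Dom_size_list values normal_size → Spec_size_list values normal_size (size_list values normal_size)

-- ===== LEMMAS AND PROOFS =====

-- the value A appends at 0-based position j
def gA (ns : Int) (j : Nat) : Int :=
  if j + 1 = 1 then truncMulFloat ns 4953959590107546 51
  else if (j + 1) % 5 = 0 then truncMulFloat ns 8106479329266893 52
  else ns

theorem sizeListGo_eq (ns : Int) (xs : List Int) :
    ∀ (i : Nat) (acc : List Int),
      sizeListGo ns xs i acc = acc ++ (List.range xs.length).map (fun j => gA ns (i + j)) := by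
  induction xs with
  | nil => intro i acc; simp [sizeListGo]
  | cons x rest ih =>
    intro i acc
    have hr : (List.range (rest.length + 1)).map (fun j => gA ns (i + j))
        = gA ns i :: (List.range rest.length).map (fun j => gA ns (i + 1 + j)) := by
      rw [List.range_succ_eq_map]
      simp [List.map_map, Function.comp]
      intro a _
      congr 1
      omega
    by_cases h1 : i + 1 = 1
    · simp only [sizeListGo, h1, ih, List.length_cons, hr]
      simp [gA, h1]
    · by_cases h5 : (i + 1) % 5 = 0
      · simp only [sizeListGo, if_neg h1, if_pos h5, ih, List.length_cons, hr]
        simp [gA, h5]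
        omega
      · simp only [sizeListGo, if_neg h1, if_neg h5, ih, List.length_cons, hr]
        simp [gA, h5]
        omega

theorem length_foldl_set {α : Type} (idxs : List Int) (e : α) :
    ∀ (L : List α), (idxs.foldl (fun l i => l.set i.toNat e) L).length = L.length := by
  induction idxs with
  | nil => intro L; rfl
  | cons i rest ih => intro L; simp [List.foldl_cons, ih, List.length_set]

theorem getElem?_foldl_set {α : Type} (idxs : List Int) (e : α)
    (h0 : ∀ i ∈ idxs, 0 ≤ i) :
    ∀ (L : List α) (j : Nat),
      (idxs.foldl (fun l i => l.set i.toNat e) L)[j]? =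
        if (j : Int) ∈ idxs ∧ j < L.length then some e else L[j]? := by
  induction idxs with
  | nil => intro L j; simp
  | cons i rest ih =>
    intro L j
    have hi : 0 ≤ i := h0 i (List.mem_cons_self ..)
    have ih' := ih (fun x hx => h0 x (List.mem_cons_of_mem _ hx)) (L.set i.toNat e) j
    simp only [List.foldl_cons] at *
    rw [ih']
    by_cases hmem : (j : Int) ∈ rest
    · by_cases hlen : j < L.length
      · simp [hmem, hlen, List.length_set, List.mem_cons]
      · simp [hmem, hlen, List.length_set]
    · by_cases hij : (j : Int) = i
      · have hji : i.toNat = j := by omega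
        by_cases hlen : j < L.length
        · simp [hij, hji, hlen, List.length_set, List.mem_cons]
        · simp [hij, hji, hlen, List.length_set, List.mem_cons]
      · have hne : i.toNat ≠ j := by omega
        simp [hmem, hij, hne, List.length_set, List.mem_cons]

theorem size_list_alt_eq (values : List Int) (ns : Int) :
    size_list_alt values ns = (List.range values.length).map (gA ns) := by
  set n := values.length with hn
  have hpos : (0 : Int) < 5 := by norm_num
  have hall : ∀ i ∈ PySem.List.pyRange 4 (n : Int) 5, (0 : Int) ≤ i := by
    intro i hi
    have := (PySem.List.mem_pyRange_iff_of_pos hpos i).mp hi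
    omega
  have hlen : ((PySem.List.pyRange 4 (n : Int) 5).foldl
      (fun l i => l.set i.toNat (truncMulFloat ns 8106479329266893 52))
      (List.replicate n ns)).length = n := by
    rw [length_foldl_set]; simp
  rcases Nat.eq_zero_or_pos n with h0 | h0
  · have hv : values = [] := List.eq_nil_of_length_eq_zero (by omega)
    subst hv
    simp [size_list_alt, PySem.List.pyRange]
    exact h0
  · apply List.ext_getElem?
    intro j
    have hne : ¬ ((PySem.List.pyRange 4 (n : Int) 5).foldl
        (fun l i => l.set i.toNat (truncMulFloat ns 8106479329266893 52))
        (List.replicate n ns)).isEmpty = true := by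
      rw [List.isEmpty_iff_length_eq_zero, hlen]; omega
    simp only [size_list_alt, ← hn]
    rw [if_neg hne]
    rw [List.getElem?_set]
    rw [getElem?_foldl_set _ _ hall]
    simp only [PySem.List.mem_pyRange_iff_of_pos hpos]
    simp only [List.getElem?_replicate, List.length_replicate, hlen,
      List.getElem?_map]
    by_cases hj : j < n
    · have hjr : (List.range n)[j]? = some j := by simp [hj]
      rw [hjr]
      simp only [Option.map_some]
      by_cases hj0 : j = 0
      · subst hj0
        simp [hj, gA]
      · have hga : gA ns j = if 4 ≤ (j:Int) ∧ (j:Int) < (n:Int) ∧ (5:Int) ∣ (j:Int) - 4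
            then truncMulFloat ns 8106479329266893 52 else ns := by
          unfold gA
          have hj1 : ¬ (j + 1 = 1) := by omega
          rw [if_neg hj1]
          by_cases h5 : (j + 1) % 5 = 0
          · rw [if_pos h5, if_pos (by omega)]
          · rw [if_neg h5, if_neg (by omega)]
        rw [hga, if_neg (show ¬ (0 = j) by omega)]
        by_cases hc : 4 ≤ (j:Int) ∧ (j:Int) < (n:Int) ∧ (5:Int) ∣ (j:Int) - 4
        · rw [if_pos ⟨hc, hj⟩, if_pos hc]
        · rw [if_neg (fun h => hc h.1), if_neg hc, if_pos hj]
    · have hjr : (List.range n)[j]? = none := by simp; omega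
      rw [hjr]
      simp only [Option.map_none]
      rw [if_neg (show ¬ (0 = j) by omega), if_neg (fun h => hj h.2), if_neg hj]

-- ===== VERDICT (by name: the statement is the Claim_ definition above) =====
theorem size_list_spec : Claim_equal_size_list := by
  intro values ns _
  unfold Spec_size_list
  rw [size_list_alt_eq]
  unfold size_list
  rw [sizeListGo_eq]
  simp
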